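-- pv_equiv track=rewrite | github.com/bbeckley-hub/Kleboscope | kleboscope/modules/kleb_qc_module/klebo_fasta_qc.py | _create_length_bins
-- ===== SOURCE A (Python) =====
-- from typing import List, Dict, Any, Optional
--
-- def _create_length_bins(lengths: List[int]) -> Dict[str, int]:
--     bins = {
--         '< 100 bp': 0,
--         '100-500 bp': 0,
--         '500-1k bp': 0,
--         '1k-5k bp': 0,
--         '5k-10k bp': 0,
--         '10k-50k bp': 0,
--         '50k-100k bp': 0,
--         '100k-500k bp': 0,
--         '500k-1M bp': 0,
--         '> 1M bp': 0
--     }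
--     for length in lengths:
--         if length < 100:
--             bins['< 100 bp'] += 1
--         elif length < 500:
--             bins['100-500 bp'] += 1
--         elif length < 1000:
--             bins['500-1k bp'] += 1
--         elif length < 5000:
--             bins['1k-5k bp'] += 1
--         elif length < 10000:
--             bins['5k-10k bp'] += 1
--         elif length < 50000:
--             bins['10k-50k bp'] += 1
--         elif length < 100000:
--             bins['50k-100k bp'] += 1
--         elif length < 500000:
--             bins['100k-500k bp'] += 1
--         elif length < 1000000:
--             bins['500k-1M bp'] += 1
--         else:
--             bins['> 1M bp'] += 1
--     return bins
-- ===== SOURCE B (Python) =====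
-- from typing import List, Dict
--
-- _BOUNDS = [100, 500, 1000, 5000, 10000, 50000, 100000, 500000, 1000000]
-- _LABELS = ['< 100 bp', '100-500 bp', '500-1k bp', '1k-5k bp', '5k-10k bp',
--            '10k-50k bp', '50k-100k bp', '100k-500k bp', '500k-1M bp', '> 1M bp']
--
-- def _create_length_bins(lengths: List[int]) -> Dict[str, int]:
--     counts = [0] * 10
--     for length in lengths:
--         # hand-rolled bisect_right over the boundary table
--         lo, hi = 0, 9
--         while lo < hi:
--             mid = (lo + hi) // 2
--             if length < _BOUNDS[mid]:
--                 hi = mid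
--             else:
--                 lo = mid + 1
--         counts[lo] += 1
--     return dict(zip(_LABELS, counts))
-- ===== Notes on version B (the rewrite author's own statement) =====
-- stated objective: idiomatic
-- what changed: Replaces the ten-branch if/elif chain with a boundary table: a hand-rolled bisect_right binary search over [100,...,1000000] picks the bin index, counts are kept in a plain list and zipped with the labels at the end.
import Mathlib
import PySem

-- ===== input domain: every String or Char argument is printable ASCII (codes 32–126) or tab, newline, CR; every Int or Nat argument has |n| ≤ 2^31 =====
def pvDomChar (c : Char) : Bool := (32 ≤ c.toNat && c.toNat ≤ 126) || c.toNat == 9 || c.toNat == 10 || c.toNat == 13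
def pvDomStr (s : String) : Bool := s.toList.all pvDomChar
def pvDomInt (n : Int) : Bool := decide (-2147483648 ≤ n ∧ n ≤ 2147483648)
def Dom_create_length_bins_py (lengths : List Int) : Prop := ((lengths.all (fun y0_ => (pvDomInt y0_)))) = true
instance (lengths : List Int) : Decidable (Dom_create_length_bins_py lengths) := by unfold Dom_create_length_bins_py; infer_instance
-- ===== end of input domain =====

-- B replaces A's ten-branch if/elif chain by a table-driven binary search over the boundaries; same results, proved below.

-- ===== PORT A =====
-- one loop step of A: bins[label] += 1 along the if/elif chain
def pvStepA (d : PySem.Dict String Int) (length : Int) : PySem.Dict String Int :=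
  if length < 100 then d.insert "< 100 bp" (d.getD "< 100 bp" 0 + 1)
  else if length < 500 then d.insert "100-500 bp" (d.getD "100-500 bp" 0 + 1)
  else if length < 1000 then d.insert "500-1k bp" (d.getD "500-1k bp" 0 + 1)
  else if length < 5000 then d.insert "1k-5k bp" (d.getD "1k-5k bp" 0 + 1)
  else if length < 10000 then d.insert "5k-10k bp" (d.getD "5k-10k bp" 0 + 1)
  else if length < 50000 then d.insert "10k-50k bp" (d.getD "10k-50k bp" 0 + 1)
  else if length < 100000 then d.insert "50k-100k bp" (d.getD "50k-100k bp" 0 + 1)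
  else if length < 500000 then d.insert "100k-500k bp" (d.getD "100k-500k bp" 0 + 1)
  else if length < 1000000 then d.insert "500k-1M bp" (d.getD "500k-1M bp" 0 + 1)
  else d.insert "> 1M bp" (d.getD "> 1M bp" 0 + 1)

def create_length_bins_py (lengths : List Int) : List (String × Int) :=
  (lengths.foldl pvStepA (PySem.Dict.ofList
    [("< 100 bp", 0), ("100-500 bp", 0), ("500-1k bp", 0), ("1k-5k bp", 0),
     ("5k-10k bp", 0), ("10k-50k bp", 0), ("50k-100k bp", 0), ("100k-500k bp", 0),
     ("500k-1M bp", 0), ("> 1M bp", 0)])).items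

-- ===== PORT B =====
def pvBounds : List Int := [100, 500, 1000, 5000, 10000, 50000, 100000, 500000, 1000000]
def pvLabels : List String :=
  ["< 100 bp", "100-500 bp", "500-1k bp", "1k-5k bp", "5k-10k bp",
   "10k-50k bp", "50k-100k bp", "100k-500k bp", "500k-1M bp", "> 1M bp"]

-- the hand-rolled bisect_right while-loop; _BOUNDS[mid] indexed with mid always in range (getD 0 is never the default)
def pvBisect (length : Int) (lo hi : Nat) : Nat :=
  if lo < hi then
    let mid := (lo + hi) / 2
    if length < pvBounds.getD mid 0 then pvBisect length lo mid
    else pvBisect length (mid + 1) hi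
  else lo
termination_by hi - lo
decreasing_by all_goals omega

def pvStepB (counts : List Int) (length : Int) : List Int :=
  let lo := pvBisect length 0 9
  counts.set lo (counts.getD lo 0 + 1)

def create_length_bins_py_alt (lengths : List Int) : List (String × Int) :=
  (PySem.Dict.ofList (pvLabels.zip (lengths.foldl pvStepB (List.replicate 10 (0 : Int))))).items

-- ===== PRECONDITION & SPEC =====
def Spec_create_length_bins_py (lengths : List Int) (out : List (String × Int)) : Prop := out = create_length_bins_py_alt lengths
instance (lengths : List Int) (out : List (String × Int)) : Decidable (Spec_create_length_bins_py lengths out) := by unfold Spec_create_length_bins_py; infer_instance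

-- ===== CLAIM (what is proved, stated in full; the proofs are below) =====
def Claim_equal_create_length_bins_py : Prop := ∀ (lengths : List Int), Dom_create_length_bins_py lengths → Spec_create_length_bins_py lengths (create_length_bins_py lengths)

-- ===== LEMMAS AND PROOFS =====

-- the chain index A effectively computes
def pvChainIdx (L : Int) : Nat :=
  if L < 100 then 0 else if L < 500 then 1 else if L < 1000 then 2
  else if L < 5000 then 3 else if L < 10000 then 4 else if L < 50000 then 5
  else if L < 100000 then 6 else if L < 500000 then 7 else if L < 1000000 then 8 else 9

lemma pvBisect_eq (L : Int) : pvBisect L 0 9 = pvChainIdx L := by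
  unfold pvChainIdx
  split_ifs <;>
    (repeat (rw [pvBisect]; norm_num [pvBounds];
             first
               | rw [if_pos (show _ by omega)]
               | rw [if_neg (show _ by omega)]
               | skip))

lemma pvStepB_length (c : List Int) (L : Int) : (pvStepB c L).length = c.length := by
  simp [pvStepB]

lemma pvStep_pair (c : List Int) (h : c.length = 10) (L : Int) :
    pvStepA (PySem.Dict.ofList (pvLabels.zip c)) L
      = PySem.Dict.ofList (pvLabels.zip (pvStepB c L)) := by
  obtain ⟨c0, c1, c2, c3, c4, c5, c6, c7, c8, c9, rfl⟩ :
      ∃ a b c' d e f g h' i j, c = [a, b, c', d, e, f, g, h', i, j] := by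
    match c, h with
    | [a, b, c', d, e, f, g, h', i, j], _ => exact ⟨a,b,c',d,e,f,g,h',i,j, rfl⟩
  unfold pvStepA pvStepB
  rw [pvBisect_eq]
  unfold pvChainIdx
  split_ifs <;>
    simp [PySem.Dict.ofList, PySem.Dict.update, PySem.Dict.insert, PySem.Dict.contains,
          PySem.Dict.empty, PySem.Dict.getD, PySem.Dict.get?, pvLabels]

lemma pvFold_pair (xs : List Int) : ∀ (c : List Int), c.length = 10 →
    xs.foldl pvStepA (PySem.Dict.ofList (pvLabels.zip c))
      = PySem.Dict.ofList (pvLabels.zip (xs.foldl pvStepB c)) := by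
  induction xs with
  | nil => intro c _; rfl
  | cons x xs ih =>
    intro c hc
    simp only [List.foldl_cons, pvStep_pair c hc x]
    exact ih _ (by rw [pvStepB_length, hc])

-- ===== VERDICT (by name: the statement is the Claim_ definition above) =====
theorem create_length_bins_py_spec : Claim_equal_create_length_bins_py := by
  intro lengths _
  unfold Spec_create_length_bins_py create_length_bins_py create_length_bins_py_alt
  rw [show (PySem.Dict.ofList
    [("< 100 bp", (0:Int)), ("100-500 bp", 0), ("500-1k bp", 0), ("1k-5k bp", 0),
     ("5k-10k bp", 0), ("10k-50k bp", 0), ("50k-100k bp", 0), ("100k-500k bp", 0),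
     ("500k-1M bp", 0), ("> 1M bp", 0)])
      = PySem.Dict.ofList (pvLabels.zip (List.replicate 10 (0 : Int))) from rfl]
  rw [pvFold_pair lengths (List.replicate 10 0) rfl]
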